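-- pv_equiv track=rewrite | github.com/ArmaoThaoSwExp/CrackingTheCodingInterview | chapter1/chapter1_5.py | replace_space_with_percent20_cstyle
-- ===== SOURCE A (Python) =====
-- def replace_space_with_percent20_cstyle(instr):
--     assert isinstance(instr, list), "Expected type list for instr, but received {0}".format(type(instr))
--     orig_len = len(instr)
--     space_cnt = instr.count(" ")
--
--     # Create additional buffer space for '%20', since an empty char means we have 1 space,
--     # we only need to allocate 2 more char space for each space char we found.
--     instr += ["" for i in range(space_cnt * 2)]
--
--     ind = len(instr) - 1
--     # To replace the spaces with '%20', we need to work backwards in our string with the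
--     # additional allocated buffer space.
--     for i in range((orig_len - 1), -1, -1):
--         if instr[i] == " ":
--             # If space is found, replace the space with %20 in the instr at its new location
--             instr[ind-2:ind+1] = ["%", "2", "0"]
--             ind -= 3
--         else:
--             # If space is not found, copy the char to its new location
--             instr[ind] = instr[i]
--             ind -= 1
--     return instr
-- ===== SOURCE B (Python) =====
-- def replace_space_with_percent20_cstyle(instr):
--     assert isinstance(instr, list), "Expected type list for instr, but received {0}".format(type(instr))
--     out = []
--     for ch in instr:
--         if ch == " ":
--             out.extend(["%", "2", "0"])
--         else:
--             out.append(ch)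
--     instr[:] = out
--     return instr
-- ===== Notes on version B (the rewrite author's own statement) =====
-- stated objective: simpler
-- what changed: Replaces A's backward two-pointer pass over a pre-padded buffer (slice assignments working right-to-left) with a single forward pass building a fresh output list, then instr[:] = out to keep the in-place mutation.
import Mathlib
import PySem

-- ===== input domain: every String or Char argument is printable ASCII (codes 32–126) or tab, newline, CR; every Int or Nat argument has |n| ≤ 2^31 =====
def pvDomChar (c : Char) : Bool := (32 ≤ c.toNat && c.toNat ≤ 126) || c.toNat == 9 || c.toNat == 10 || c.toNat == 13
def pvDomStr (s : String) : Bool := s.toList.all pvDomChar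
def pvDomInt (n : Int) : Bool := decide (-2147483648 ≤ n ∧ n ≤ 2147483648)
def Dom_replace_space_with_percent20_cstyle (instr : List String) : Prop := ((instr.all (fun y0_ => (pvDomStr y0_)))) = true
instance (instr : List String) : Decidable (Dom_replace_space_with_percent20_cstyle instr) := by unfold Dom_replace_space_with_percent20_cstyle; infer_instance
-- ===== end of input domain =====

-- B replaces A's backward two-pointer pass over a pre-padded buffer with a single forward
-- pass building a fresh list (objective: simpler).  Both Pythons mutate the argument list in
-- place identically (A via writes, B via instr[:] = out); the theorems here are about the
-- return value, which for both equals the final state of the list.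

-- ===== PORT A =====
-- instr[i] read (index is proved in range along every path of this algorithm; the default
-- "" is the unreachable IndexError case)
def pvGetI (l : List String) (i : Int) : String := PySem.List.pyGetD l i ""

-- Python slice/index normalisation: wrap a negative index by +len, clamp into [0, len]
def pvSliceIx (len : Int) (i : Int) : Int := min (max (if i < 0 then i + len else i) 0) len

-- instr[ind] = x  (Python wraps a negative index; out-of-range = IndexError, unreachable here)
def pvSetI (l : List String) (i : Int) (x : String) : List String :=
  if (if i < 0 then i + l.length else i) < 0 then l
  else l.set (if i < 0 then i + l.length else i).toNat x

-- instr[a:b] = xs  : Python slice-assignment with Python's bound normalisation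
def pvSetSlice (l : List String) (a b : Int) (xs : List String) : List String :=
  l.take (pvSliceIx l.length a).toNat ++ xs
    ++ l.drop (max (pvSliceIx l.length a) (pvSliceIx l.length b)).toNat

-- for i in range(orig_len - 1, -1, -1): …   (structural countdown over the remaining indices;
-- at fuel i+1 the body processes index i, exactly A's descending loop)
def pvLoopA : Nat → List String → Int → List String
  | 0, l, _ => l
  | i + 1, l, ind =>
    if pvGetI l i == " " then
      pvLoopA i (pvSetSlice l (ind - 2) (ind + 1) ["%", "2", "0"]) (ind - 3)
    else
      pvLoopA i (pvSetI l ind (pvGetI l i)) (ind - 1)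

def replace_space_with_percent20_cstyle (instr : List String) : List String :=
  let origLen := instr.length
  let spaceCnt := PySem.List.count instr " "
  let instr2 := instr ++ (List.replicate (spaceCnt * 2) "")
  pvLoopA origLen instr2 ((instr2.length : Int) - 1)

-- ===== PORT B =====
-- out = []; for ch in instr: extend/append; instr[:] = out; return instr  (return value = out)
def replace_space_with_percent20_cstyle_alt (instr : List String) : List String :=
  instr.foldl (fun out ch => if ch == " " then out ++ ["%", "2", "0"] else out ++ [ch]) []

-- ===== PRECONDITION & SPEC =====
def Spec_replace_space_with_percent20_cstyle (instr : List String) (out : List String) : Prop := out = replace_space_with_percent20_cstyle_alt instr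
instance (instr : List String) (out : List String) : Decidable (Spec_replace_space_with_percent20_cstyle instr out) := by unfold Spec_replace_space_with_percent20_cstyle; infer_instance

-- ===== CLAIM (what is proved, stated in full; the proofs are below) =====
def Claim_equal_replace_space_with_percent20_cstyle : Prop := ∀ (instr : List String), Dom_replace_space_with_percent20_cstyle instr → Spec_replace_space_with_percent20_cstyle instr (replace_space_with_percent20_cstyle instr)

-- ===== LEMMAS AND PROOFS =====

-- the intended result: each " " becomes "%","2","0", everything else is kept
def pvRepl (l : List String) : List String :=
  l.flatMap (fun ch => if ch == " " then ["%", "2", "0"] else [ch])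

lemma pvAlt_eq_repl (instr : List String) :
    replace_space_with_percent20_cstyle_alt instr = pvRepl instr := by
  unfold replace_space_with_percent20_cstyle_alt pvRepl
  have hf : (fun (out : List String) (ch : String) =>
      if ch == " " then out ++ ["%", "2", "0"] else out ++ [ch])
      = (fun out ch => out ++ (if ch == " " then ["%", "2", "0"] else [ch])) := by
    funext o c; by_cases h : c == " " <;> simp [h]
  rw [hf, PySem.List.foldl_append_eq_flatMap]
  simp

-- pvSetSlice with in-range Nat bounds is take/replace/drop
lemma pvSetSlice_nat (l xs : List String) (a b : Nat) (hab : a ≤ b) (hbl : b ≤ l.length) :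
    pvSetSlice l (a : Int) (b : Int) xs = l.take a ++ xs ++ l.drop b := by
  unfold pvSetSlice pvSliceIx
  rw [if_neg (by omega), if_neg (by omega)]
  rw [show min (max ((a : Nat) : Int) 0) ((l.length : Nat) : Int) = (a : Int) from by omega]
  rw [show min (max ((b : Nat) : Int) 0) ((l.length : Nat) : Int) = (b : Int) from by omega]
  rw [max_eq_right (by omega)]
  simp

-- pvSetI with an in-range Nat index is List.set
lemma pvSetI_nat (l : List String) (i : Nat) (x : String) :
    pvSetI l (i : Int) x = l.set i x := by
  unfold pvSetI
  rw [if_neg (by omega), if_neg (by omega)]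
  simp

-- prefix ++ block ++ rest: take at an offset inside the block
lemma pv_take_block (P B R : List String) (k : Nat) (hk : k ≤ B.length) :
    (P ++ (B ++ R)).take (P.length + k) = P ++ B.take k := by
  rw [List.take_append, List.take_of_length_le (by omega),
      Nat.add_sub_cancel_left, List.take_append,
      Nat.sub_eq_zero_of_le hk]
  simp

-- prefix ++ block ++ rest: drop at the end of the block
lemma pv_drop_block (P B R : List String) :
    (P ++ (B ++ R)).drop (P.length + B.length) = R := by
  rw [List.drop_append, List.drop_eq_nil_of_le (by omega),
      Nat.add_sub_cancel_left, List.drop_append,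
      List.drop_eq_nil_of_le (le_refl _)]
  simp

-- prefix ++ block ++ rest: set the last cell of the block
lemma pv_set_block (P R : List String) (y x : String) (J : List String) :
    (P ++ ((y :: J) ++ R)).set (P.length + J.length) x
      = P ++ ((y :: J).take J.length ++ (x :: R)) := by
  rw [List.set_append, if_neg (by omega), Nat.add_sub_cancel_left,
      List.set_append, if_pos (by simp), List.set_eq_take_append_cons_drop,
      if_pos (by simp), List.drop_eq_nil_of_le (by simp)]
  simp

-- Loop invariant for A's backward pass.  Before processing index n-1 the list is
-- (unprocessed prefix) ++ (stale buffer J of length 2*spaces-in-prefix) ++ (finished suffix),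
-- and ind points at the last buffer cell.
lemma pvLoopA_inv : ∀ (n : Nat) (orig J : List String), n ≤ orig.length →
    J.length = 2 * List.count " " (orig.take n) →
    pvLoopA n (orig.take n ++ J ++ pvRepl (orig.drop n)) ((n : Int) - 1 + J.length)
      = pvRepl orig := by
  intro n
  induction n with
  | zero =>
    intro orig J _ hJ
    simp at hJ
    simp [pvLoopA, hJ]
  | succ n ih =>
    intro orig J hn hJ
    have hlt : n < orig.length := hn
    have htake : orig.take (n + 1) = orig.take n ++ [orig[n]] := by
      rw [List.take_add_one]
      simp [List.getElem?_eq_getElem hlt]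
    have hdrop : orig.drop n = orig[n] :: orig.drop (n + 1) :=
      List.drop_eq_getElem_cons hlt
    have hlen_take : (orig.take n).length = n := List.length_take_of_le (le_of_lt hlt)
    -- the current list, regrouped around the block orig[n] :: J
    have hl : orig.take (n + 1) ++ J ++ pvRepl (orig.drop (n + 1))
        = orig.take n ++ ((orig[n] :: J) ++ pvRepl (orig.drop (n + 1))) := by
      rw [htake]
      simp only [List.append_assoc, List.cons_append, List.nil_append]
    -- the element read by the loop body
    have hget : pvGetI (orig.take (n + 1) ++ J ++ pvRepl (orig.drop (n + 1))) n = orig[n] := by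
      unfold pvGetI
      rw [hl]
      have h1 : (n : Int) < ((orig.take n ++ ((orig[n] :: J) ++ pvRepl (orig.drop (n + 1)))).length : Int) := by
        simp only [List.length_append, List.length_cons, hlen_take]; omega
      rw [PySem.List.pyGetD_eq_getElem _ _ (by positivity) h1]
      simp [hlen_take]
    unfold pvLoopA
    rw [hget]
    by_cases hsp : orig[n] == " "
    · -- space: slice-assign ["%","2","0"] at [ind-2, ind+1)
      simp only [hsp, if_true]
      have hxval : orig[n] = " " := by simpa using hsp
      have hcnt : List.count " " (orig.take (n + 1)) = List.count " " (orig.take n) + 1 := by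
        rw [htake, List.count_append]; simp [hxval]
      have hJ' : J.length = 2 * List.count " " (orig.take n) + 2 := by omega
      rw [hl]
      rw [show ((n + 1 : Nat) : Int) - 1 + (J.length : Int) - 2 = ((n + (J.length - 2) : Nat) : Int) from by push_cast; omega]
      rw [show ((n + 1 : Nat) : Int) - 1 + (J.length : Int) + 1 = ((n + (J.length + 1) : Nat) : Int) from by push_cast; omega]
      rw [pvSetSlice_nat _ _ _ _ (by omega)
        (by simp only [List.length_append, List.length_cons, hlen_take]; omega)]
      rw [show n + (J.length - 2) = (orig.take n).length + (J.length - 2) from by omega]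
      rw [pv_take_block _ _ _ _ (by simp only [List.length_cons]; omega)]
      rw [show n + (J.length + 1) = (orig.take n).length + (orig[n] :: J).length from by
        simp only [List.length_cons, hlen_take]]
      rw [pv_drop_block]
      have hfin : ["%", "2", "0"] ++ pvRepl (orig.drop (n + 1)) = pvRepl (orig.drop n) := by
        unfold pvRepl
        rw [hdrop, List.flatMap_cons, if_pos hsp]
      have hih := ih orig ((orig[n] :: J).take (J.length - 2)) (le_of_lt hlt)
        (by simp only [List.length_take, List.length_cons]; omega)
      rw [show ((n + 1 : Nat) : Int) - 1 + (J.length : Int) - 3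
          = (n : Int) - 1 + (((orig[n] :: J).take (J.length - 2)).length : Int) from by
        simp only [List.length_take, List.length_cons]; omega]
      simpa [List.append_assoc, hfin] using hih
    · -- not a space: copy instr[i] to position ind
      rw [if_neg hsp]
      have hxval : ¬ orig[n] = " " := by simpa using hsp
      have hcnt : List.count " " (orig.take (n + 1)) = List.count " " (orig.take n) := by
        rw [htake, List.count_append]
        simp [hxval]
      rw [hl]
      rw [show ((n + 1 : Nat) : Int) - 1 + (J.length : Int) = ((n + J.length : Nat) : Int) from by push_cast; omega]
      rw [pvSetI_nat]
      rw [show n + J.length = (orig.take n).length + J.length from by rw [hlen_take]]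
      rw [pv_set_block]
      have hfin : orig[n] :: pvRepl (orig.drop (n + 1)) = pvRepl (orig.drop n) := by
        unfold pvRepl
        rw [hdrop, List.flatMap_cons, if_neg hsp, List.singleton_append]
      have hih := ih orig ((orig[n] :: J).take J.length) (le_of_lt hlt)
        (by simp only [List.length_take, List.length_cons]; omega)
      rw [show (((orig.take n).length + J.length : Nat) : Int) - 1
          = (n : Int) - 1 + (((orig[n] :: J).take J.length).length : Int) from by
        simp only [List.length_take, List.length_cons, hlen_take]; omega]
      simpa [List.append_assoc, hfin] using hih

lemma pvA_eq_repl (instr : List String) :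
    replace_space_with_percent20_cstyle instr = pvRepl instr := by
  show pvLoopA instr.length (instr ++ List.replicate (PySem.List.count instr " " * 2) "")
      (((instr ++ List.replicate (PySem.List.count instr " " * 2) "").length : Int) - 1)
    = pvRepl instr
  have h := pvLoopA_inv instr.length instr
    (List.replicate (PySem.List.count instr " " * 2) "") (le_refl _)
    (by simp [PySem.List.count_eq]; ring)
  simp only [List.take_length, List.drop_length] at h
  have hrepl : pvRepl ([] : List String) = [] := rfl
  rw [hrepl, List.append_nil] at h
  rw [show ((instr ++ List.replicate (PySem.List.count instr " " * 2) "").length : Int) - 1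
      = (instr.length : Int) - 1
        + ((List.replicate (PySem.List.count instr " " * 2) "").length : Int) from by
    simp only [List.length_append]; push_cast; ring]
  exact h

-- ===== VERDICT (by name: the statement is the Claim_ definition above) =====
theorem replace_space_with_percent20_cstyle_spec : Claim_equal_replace_space_with_percent20_cstyle := by
  intro instr _
  unfold Spec_replace_space_with_percent20_cstyle
  rw [pvA_eq_repl, pvAlt_eq_repl]
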